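-- pv_equiv track=rewrite | github.com/IMI-HD/dataquieR | dataquieR2ODM.py | sort_new_hierarchy2
-- ===== SOURCE A (Python) =====
-- def sort_new_hierarchy2(
--     varname_groups, list_keys, study_segment_column, hierarchy_column, hierarchy
-- ):
--     # go through all listed keys which have too many items
--     for key in list_keys:
--         # save the dictionary and delete the previous one
--         dictionary = varname_groups[key]
--         del varname_groups[key]
--         # count the item per xml
--         count = 0
--         count_keys = 0
--         # new sort of the dictionary
--         for _, group in dictionary.items():
--             for item in group:
--                 if count >= 4500:
--                     count = 0
--                 # if count 0 calculate a new study_segment key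
--                 if count == 0:
--                     studyevent = str(key) + "_" + str(count_keys)
--                     study_segment = str(key) + "_" + str(count_keys)
--                     count_keys += 1
--
--                 # 2D dictionary for studyevent and formdef
--                 if studyevent not in varname_groups:
--                     varname_groups[studyevent] = {}
--                 if study_segment not in varname_groups[studyevent]:
--                     varname_groups[studyevent][study_segment] = []
--
--                 # add the whole line as a list to the key itemgroup
--                 varname_groups[studyevent][study_segment].append(item)
--
--                 count += 1
--
--     return varname_groups
-- ===== SOURCE B (Python) =====
-- def sort_new_hierarchy2(
--     varname_groups, list_keys, study_segment_column, hierarchy_column, hierarchy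
-- ):
--     # Chunk-at-a-time: gather the oversized key's items, then repeatedly split
--     # off the first 4500 as one chunk and install it wholesale under the next
--     # f"{key}_{g}" destination -- no per-item counting or per-item dict updates.
--     for key in list_keys:
--         flat = [item for group in varname_groups.pop(key).values() for item in group]
--         g = 0
--         while flat:
--             chunk, flat = flat[:4500], flat[4500:]
--             dest = key + "_" + str(g)
--             varname_groups.setdefault(dest, {}).setdefault(dest, []).extend(chunk)
--             g += 1
--     return varname_groups
-- ===== Notes on version B (the rewrite author's own statement) =====
-- stated objective: alternative
-- what changed: Replaces A's per-item state machine (count/count_keys counters with resets at 4500, twin studyevent/study_segment variables, per-item membership guards and per-item appends) by chunk-at-a-time processing: gather the key's items, then repeatedly split off the first 4500 as one chunk and install it wholesale (setdefault + extend) under the next key_g destination. …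
import Mathlib
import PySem

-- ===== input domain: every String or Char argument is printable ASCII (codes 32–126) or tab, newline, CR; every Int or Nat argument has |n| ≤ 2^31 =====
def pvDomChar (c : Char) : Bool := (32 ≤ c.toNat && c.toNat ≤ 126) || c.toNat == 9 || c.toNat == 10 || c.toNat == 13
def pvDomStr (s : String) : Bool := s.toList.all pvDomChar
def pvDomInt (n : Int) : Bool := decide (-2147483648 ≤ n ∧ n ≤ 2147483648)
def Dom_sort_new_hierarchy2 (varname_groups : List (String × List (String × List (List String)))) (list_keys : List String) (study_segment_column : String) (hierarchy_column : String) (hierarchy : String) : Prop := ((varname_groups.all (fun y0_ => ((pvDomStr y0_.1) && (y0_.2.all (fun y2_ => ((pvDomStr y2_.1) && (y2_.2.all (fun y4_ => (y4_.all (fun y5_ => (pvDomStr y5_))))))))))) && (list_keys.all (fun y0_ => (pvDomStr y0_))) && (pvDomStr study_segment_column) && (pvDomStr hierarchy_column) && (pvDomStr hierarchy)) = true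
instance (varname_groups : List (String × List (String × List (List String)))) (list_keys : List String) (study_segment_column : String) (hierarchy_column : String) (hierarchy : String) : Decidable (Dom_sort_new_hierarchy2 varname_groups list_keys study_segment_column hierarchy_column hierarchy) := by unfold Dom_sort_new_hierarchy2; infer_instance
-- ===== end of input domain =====

-- B replaces A's per-item state machine (counters with reset at 4500, per-item guards and appends)
-- by chunk-at-a-time processing: split off the first 4500 items and install them wholesale.
-- Both Pythons mutate varname_groups in place the same way (old key removed, chunk keys added);
-- the equivalence proved here is about the return value.

-- marshalling of the dict-of-dicts argument/result between the association-list signature and PySem.Dict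
def dictOfPairs (vg : List (String × List (String × List (List String)))) :
    PySem.Dict String (PySem.Dict String (List (List String))) :=
  PySem.Dict.mk (vg.map (fun p => (p.1, PySem.Dict.mk p.2)))

def pairsOfDict (d : PySem.Dict String (PySem.Dict String (List (List String)))) :
    List (String × List (String × List (List String))) :=
  d.items.map (fun p => (p.1, p.2.items))

-- ===== PORT A =====
-- body of A's innermost 'for item in group' loop; state = (varname_groups, count, count_keys, studyevent, study_segment)
def aItemStep (key : String)
    (st : PySem.Dict String (PySem.Dict String (List (List String))) × Int × Int × String × String)
    (item : List String) :
    PySem.Dict String (PySem.Dict String (List (List String))) × Int × Int × String × String :=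
  match st with
  | (d, count, count_keys, studyevent, study_segment) =>
    let count1 := if count ≥ 4500 then 0 else count
    let studyevent1 := if count1 = 0 then key ++ "_" ++ PySem.Int.toStr count_keys else studyevent
    let study_segment1 := if count1 = 0 then key ++ "_" ++ PySem.Int.toStr count_keys else study_segment
    let count_keys1 := if count1 = 0 then count_keys + 1 else count_keys
    let d1 := if d.contains studyevent1 then d else d.insert studyevent1 PySem.Dict.empty
    let d2 := if (d1.getD studyevent1 PySem.Dict.empty).contains study_segment1 then d1
              else d1.insert studyevent1 ((d1.getD studyevent1 PySem.Dict.empty).insert study_segment1 [])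
    -- varname_groups[studyevent][study_segment].append(item): in-place nested append,
    -- rendered as nested modify (exact: both keys are present here thanks to the two guards above)
    let d3 := d2.modify studyevent1 PySem.Dict.empty
                (fun inner => inner.modify study_segment1 [] (fun l => l ++ [item]))
    (d3, count1 + 1, count_keys1, studyevent1, study_segment1)

-- body of A's 'for key in list_keys' loop
def aKeyStep (d : PySem.Dict String (PySem.Dict String (List (List String)))) (key : String) :
    PySem.Dict String (PySem.Dict String (List (List String))) :=
  match d.get? key with
  | none => d  -- Python raises KeyError here; such inputs are excluded by Pre_
  | some dictionary =>
    let d := d.erase key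
    -- Python's studyevent/study_segment are unassigned until the first item; "" is never read before then
    (dictionary.items.foldl (fun st p => p.2.foldl (aItemStep key) st) (d, 0, 0, "", "")).1

def sort_new_hierarchy2 (varname_groups : List (String × List (String × List (List String)))) (list_keys : List String) (study_segment_column : String) (hierarchy_column : String) (hierarchy : String) : List (String × List (String × List (List String))) :=
  pairsOfDict (list_keys.foldl aKeyStep (dictOfPairs varname_groups))

-- ===== PORT B =====
-- B's 'while flat:' loop: chunk, flat = flat[:4500], flat[4500:]; install chunk wholesale; g += 1
def bChunkLoop (key : String) (g : Int) (flat : List (List String))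
    (d : PySem.Dict String (PySem.Dict String (List (List String)))) :
    PySem.Dict String (PySem.Dict String (List (List String))) :=
  match hf : flat with
  | [] => d
  | _ :: _ =>
    let chunk := PySem.List.slice flat none (some 4500)           -- flat[:4500]
    let rest := PySem.List.slice flat (some 4500) none            -- flat[4500:]
    let dest := key ++ "_" ++ PySem.Int.toStr g
    -- setdefault(dest, {}).setdefault(dest, []).extend(chunk): nested in-place update,
    -- rendered as nested modify with the setdefault defaults (exact)
    bChunkLoop key (g + 1) rest
      (d.modify dest PySem.Dict.empty (fun inner => inner.modify dest [] (fun l => l ++ chunk)))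
termination_by flat.length
decreasing_by
  subst hf
  rw [PySem.List.slice_from _ (by norm_num)]
  simp

-- body of B's 'for key in list_keys' loop
def bKeyStep (d : PySem.Dict String (PySem.Dict String (List (List String)))) (key : String) :
    PySem.Dict String (PySem.Dict String (List (List String))) :=
  match d.pop? key with
  | none => d  -- Python raises KeyError here; such inputs are excluded by Pre_
  | some dd => bChunkLoop key 0 (dd.1.values.flatten) dd.2

def sort_new_hierarchy2_alt (varname_groups : List (String × List (String × List (List String)))) (list_keys : List String) (study_segment_column : String) (hierarchy_column : String) (hierarchy : String) : List (String × List (String × List (List String))) :=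
  pairsOfDict (list_keys.foldl bKeyStep (dictOfPairs varname_groups))

-- ===== PRECONDITION & SPEC =====
-- Pre_ excludes inputs on which A raises KeyError (a listed key missing when its turn comes); it is the
-- closed-form sufficient condition "list_keys duplicate-free and contained in the original keys", which
-- conservatively also excludes the exotic inputs where a listed key only exists because an earlier
-- repartition created it (there A returns and B returns the same value).
def Pre_sort_new_hierarchy2 (varname_groups : List (String × List (String × List (List String)))) (list_keys : List String) (study_segment_column : String) (hierarchy_column : String) (hierarchy : String) : Prop :=
  list_keys.Nodup ∧ ∀ k ∈ list_keys, k ∈ varname_groups.map (·.1)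
instance (varname_groups : List (String × List (String × List (List String)))) (list_keys : List String) (study_segment_column : String) (hierarchy_column : String) (hierarchy : String) : Decidable (Pre_sort_new_hierarchy2 varname_groups list_keys study_segment_column hierarchy_column hierarchy) := by unfold Pre_sort_new_hierarchy2; infer_instance

def pvWitness_sort_new_hierarchy2 : (List (String × List (String × List (List String)))) × List String × String × String × String :=
  ([("a", [("g", [["x"], ["y"]]), ("h", [["z"]])]), ("b", [])], ["a", "b"], "s", "h", "v")

def Spec_sort_new_hierarchy2 (varname_groups : List (String × List (String × List (List String)))) (list_keys : List String) (study_segment_column : String) (hierarchy_column : String) (hierarchy : String) (out : List (String × List (String × List (List String)))) : Prop := out = sort_new_hierarchy2_alt varname_groups list_keys study_segment_column hierarchy_column hierarchy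
instance (varname_groups : List (String × List (String × List (List String)))) (list_keys : List String) (study_segment_column : String) (hierarchy_column : String) (hierarchy : String) (out : List (String × List (String × List (List String)))) : Decidable (Spec_sort_new_hierarchy2 varname_groups list_keys study_segment_column hierarchy_column hierarchy out) := by unfold Spec_sort_new_hierarchy2; infer_instance

-- ===== CLAIM (what is proved, stated in full; the proofs are below) =====
def Claim_equal_sort_new_hierarchy2 : Prop := ∀ (varname_groups : List (String × List (String × List (List String)))) (list_keys : List String) (study_segment_column : String) (hierarchy_column : String) (hierarchy : String), Dom_sort_new_hierarchy2 varname_groups list_keys study_segment_column hierarchy_column hierarchy → Pre_sort_new_hierarchy2 varname_groups list_keys study_segment_column hierarchy_column hierarchy → Spec_sort_new_hierarchy2 varname_groups list_keys study_segment_column hierarchy_column hierarchy (sort_new_hierarchy2 varname_groups list_keys study_segment_column hierarchy_column hierarchy)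

-- ===== LEMMAS AND PROOFS =====

-- proof-side intermediate: one item placed at absolute index p.1 goes to chunk p.1 // 4500
def bItemStep (key : String) (d : PySem.Dict String (PySem.Dict String (List (List String))))
    (p : Int × List String) : PySem.Dict String (PySem.Dict String (List (List String))) :=
  let dest := key ++ "_" ++ PySem.Int.toStr (PySem.Int.floordiv p.1 4500)
  d.modify dest PySem.Dict.empty (fun inner => inner.modify dest [] (fun l => l ++ [p.2]))

-- A's two existence guards followed by the nested append collapse to the bare nested modify
lemma upd_eq (d : PySem.Dict String (PySem.Dict String (List (List String)))) (k : String) (item : List String) :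
    (let d1 := if d.contains k then d else d.insert k PySem.Dict.empty
     let d2 := if (d1.getD k PySem.Dict.empty).contains k then d1
               else d1.insert k ((d1.getD k PySem.Dict.empty).insert k ([] : List (List String)))
     d2.modify k PySem.Dict.empty (fun inner => inner.modify k [] (fun l => l ++ [item])))
    = d.modify k PySem.Dict.empty (fun inner => inner.modify k [] (fun l => l ++ [item])) := by
  simp only []
  by_cases hc : d.contains k = true
  · simp only [hc, if_true]
    by_cases hi : (d.getD k PySem.Dict.empty).contains k = true
    · simp [hi]
    · simp only [Bool.not_eq_true] at hi
      simp only [hi, Bool.false_eq_true, if_false]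
      unfold PySem.Dict.modify
      simp only [PySem.Dict.getD_insert_self, PySem.Dict.insert_insert_self]
      rw [PySem.Dict.getD_of_not_contains _ _ hi]
  · simp only [Bool.not_eq_true] at hc
    simp only [hc, Bool.false_eq_true, if_false, PySem.Dict.getD_insert_self,
      PySem.Dict.contains_empty]
    unfold PySem.Dict.modify
    simp only [PySem.Dict.getD_insert_self, PySem.Dict.insert_insert_self,
      PySem.Dict.getD_of_not_contains _ _ hc]
    rw [PySem.Dict.getD_of_not_contains _ _ (PySem.Dict.contains_empty k)]

lemma floordiv_natCast (n : Nat) : PySem.Int.floordiv (n : Int) 4500 = ((n / 4500 : Nat) : Int) := by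
  unfold PySem.Int.floordiv
  rw [Int.fdiv_eq_ediv]
  simp

lemma stepAB (key : String) (item : List String) (n : Nat)
    (d : PySem.Dict String (PySem.Dict String (List (List String)))) (c ck : Int) (se ss : String)
    (hc : (n = 0 ∧ c = 0) ∨ (1 ≤ n ∧ c = (((n - 1) % 4500 : Nat) : Int) + 1))
    (hck : ck = (((n + 4499) / 4500 : Nat) : Int))
    (hse : n % 4500 ≠ 0 → se = key ++ "_" ++ PySem.Int.toStr ((n / 4500 : Nat) : Int) ∧ ss = se) :
    aItemStep key (d, c, ck, se, ss) item =
      (bItemStep key d ((n : Int), item),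
       ((n % 4500 : Nat) : Int) + 1,
       ((((n + 1) + 4499) / 4500 : Nat) : Int),
       key ++ "_" ++ PySem.Int.toStr ((n / 4500 : Nat) : Int),
       key ++ "_" ++ PySem.Int.toStr ((n / 4500 : Nat) : Int)) := by
  have hc1 : (if c ≥ 4500 then (0:Int) else c) = ((n % 4500 : Nat) : Int) := by
    split <;> omega
  unfold aItemStep bItemStep
  simp only [hc1, floordiv_natCast]
  by_cases h0 : n % 4500 = 0
  · have hck' : ck = ((n / 4500 : Nat) : Int) := by omega
    have hck1 : ck + 1 = ((((n + 1) + 4499) / 4500 : Nat) : Int) := by omega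
    have hstep : ((n / 4500 : Nat) : Int) + 1 = ((((n + 1) + 4499) / 4500 : Nat) : Int) := by omega
    simp only [h0, Nat.cast_zero, if_true, hck', upd_eq, hstep]
  · have h0' : ¬ (((n % 4500 : Nat) : Int) = 0) := by omega
    have hck1 : ck = ((((n + 1) + 4499) / 4500 : Nat) : Int) := by omega
    obtain ⟨h1, h2⟩ := hse h0
    simp only [h0', if_false, h1, h2, hck1, upd_eq]

-- A's fold over the flattened items, started correctly, equals the indexed per-item fold
lemma inner_eq (key : String) (flat : List (List String)) :
    ∀ (n : Nat) (d : PySem.Dict String (PySem.Dict String (List (List String)))) (c ck : Int) (se ss : String),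
      (n = 0 ∧ c = 0) ∨ (1 ≤ n ∧ c = (((n - 1) % 4500 : Nat) : Int) + 1) →
      ck = (((n + 4499) / 4500 : Nat) : Int) →
      (n % 4500 ≠ 0 → se = key ++ "_" ++ PySem.Int.toStr ((n / 4500 : Nat) : Int) ∧ ss = se) →
      (flat.foldl (aItemStep key) (d, c, ck, se, ss)).1 =
        (PySem.List.enumerate flat (n : Int)).foldl (bItemStep key) d := by
  induction flat with
  | nil => intro n d c ck se ss _ _ _; simp [PySem.List.enumerate_nil]
  | cons x xs ih =>
    intro n d c ck se ss hc hck hse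
    rw [List.foldl_cons, PySem.List.enumerate_cons, List.foldl_cons,
        stepAB key x n d c ck se ss hc hck hse]
    have hc' : ((n + 1 = 0 ∧ ((n % 4500 : Nat) : Int) + 1 = 0) ∨
        (1 ≤ n + 1 ∧ ((n % 4500 : Nat) : Int) + 1 = ((((n + 1) - 1) % 4500 : Nat) : Int) + 1)) := by
      right; constructor <;> omega
    have hse' : (n + 1) % 4500 ≠ 0 →
        key ++ "_" ++ PySem.Int.toStr ((n / 4500 : Nat) : Int)
          = key ++ "_" ++ PySem.Int.toStr (((n + 1) / 4500 : Nat) : Int) ∧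
        key ++ "_" ++ PySem.Int.toStr ((n / 4500 : Nat) : Int)
          = key ++ "_" ++ PySem.Int.toStr ((n / 4500 : Nat) : Int) := by
      intro h
      have : (n / 4500 : Nat) = ((n + 1) / 4500 : Nat) := by omega
      rw [this]
      exact ⟨rfl, rfl⟩
    have := ih (n + 1) (bItemStep key d ((n : Int), x)) _ _ _ _ hc' rfl hse'
    rw [this]
    norm_num

-- two modifies at the same key compose
lemma modify_modify {κ ν : Type} [BEq κ] [LawfulBEq κ] (d : PySem.Dict κ ν) (k : κ) (v0 v1 : ν) (f g : ν → ν) :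
    (d.modify k v0 f).modify k v1 g = d.modify k v0 (fun v => g (f v)) := by
  unfold PySem.Dict.modify
  rw [PySem.Dict.getD_insert_self, PySem.Dict.insert_insert_self]

lemma nested_modify_modify (d : PySem.Dict String (PySem.Dict String (List (List String))))
    (k : String) (f g : List (List String) → List (List String)) :
    ((d.modify k PySem.Dict.empty (fun inner => inner.modify k [] f)).modify k PySem.Dict.empty
        (fun inner => inner.modify k [] g))
    = d.modify k PySem.Dict.empty (fun inner => inner.modify k [] (fun l => g (f l))) := by
  rw [modify_modify]
  congr 1
  funext inner
  rw [modify_modify]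

-- the per-item fold over a block whose indices all map to chunk g is one wholesale extend
lemma item_fold_acc (key dest : String) (g : Int) (xs : List (List String)) :
    ∀ (n0 : Int) (acc : List (List String))
      (d : PySem.Dict String (PySem.Dict String (List (List String)))),
      (∀ i : Nat, i < xs.length → PySem.Int.floordiv (n0 + i) 4500 = g) →
      dest = key ++ "_" ++ PySem.Int.toStr g →
      (PySem.List.enumerate xs n0).foldl (bItemStep key)
          (d.modify dest PySem.Dict.empty (fun inner => inner.modify dest [] (fun l => l ++ acc)))
        = d.modify dest PySem.Dict.empty
            (fun inner => inner.modify dest [] (fun l => l ++ (acc ++ xs))) := by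
  induction xs with
  | nil => intro n0 acc d _ _; simp [PySem.List.enumerate_nil]
  | cons x xs ih =>
    intro n0 acc d hdiv hdest
    rw [PySem.List.enumerate_cons, List.foldl_cons]
    have h0 : PySem.Int.floordiv n0 4500 = g := by
      have := hdiv 0 (by simp)
      simpa using this
    have hstep : bItemStep key
        (d.modify dest PySem.Dict.empty (fun inner => inner.modify dest [] (fun l => l ++ acc)))
        (n0, x)
        = d.modify dest PySem.Dict.empty
            (fun inner => inner.modify dest [] (fun l => l ++ (acc ++ [x]))) := by
      unfold bItemStep
      simp only [h0, ← hdest]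
      rw [nested_modify_modify]
      congr 1
      funext inner
      congr 1
      funext l
      simp
    rw [hstep, ih (n0 + 1) (acc ++ [x]) d
        (fun i hi => by
          have h := hdiv (i + 1) (by simpa using Nat.succ_lt_succ hi)
          push_cast at h
          rw [show n0 + 1 + (i : Int) = n0 + ((i : Int) + 1) from by ring]
          exact h) hdest]
    simp

-- fdiv of an in-chunk index
lemma floordiv_chunk (g : Int) (i : Nat) (hi : i < 4500) :
    PySem.Int.floordiv (4500 * g + i) 4500 = g := by
  unfold PySem.Int.floordiv
  rw [Int.fdiv_eq_ediv]
  norm_num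
  omega

-- B's chunk loop equals the indexed per-item fold
lemma chunkLoop_eq (key : String) (n : Nat) :
    ∀ (flat : List (List String)), flat.length ≤ n →
    ∀ (g : Int) (d : PySem.Dict String (PySem.Dict String (List (List String)))),
      bChunkLoop key g flat d
        = (PySem.List.enumerate flat (4500 * g)).foldl (bItemStep key) d := by
  induction n with
  | zero =>
    intro flat hlen g d
    have : flat = [] := List.length_eq_zero_iff.mp (Nat.le_zero.mp hlen)
    subst this
    rw [bChunkLoop]
    simp [PySem.List.enumerate_nil]
  | succ n ih =>
    intro flat hlen g d
    cases flat with
    | nil => rw [bChunkLoop]; simp [PySem.List.enumerate_nil]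
    | cons x xs =>
      rw [bChunkLoop]
      have ht45 : (4500 : Int).toNat = 4500 := rfl
      simp only [PySem.List.slice_from _ (by norm_num : (0:Int) ≤ 4500), ht45]
      have htake : PySem.List.slice (x :: xs) none (some 4500) = (x :: xs).take 4500 := by
        rw [PySem.List.slice_to _ (by norm_num : (0:Int) ≤ 4500), ht45]
      rw [htake]
      have hsplit : (x :: xs) = (x :: xs).take 4500 ++ (x :: xs).drop 4500 := by
        simp
      conv_rhs => rw [hsplit]
      rw [PySem.List.enumerate_append, List.foldl_append]
      have htakelt : ((x :: xs).take 4500).length ≤ 4500 := by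
        simp [List.length_take]
      -- the take-part: one wholesale extend
      have hchunk : ∀ d', (PySem.List.enumerate ((x :: xs).take 4500) (4500 * g)).foldl
            (bItemStep key) d'
          = d'.modify (key ++ "_" ++ PySem.Int.toStr g) PySem.Dict.empty
              (fun inner => inner.modify (key ++ "_" ++ PySem.Int.toStr g) []
                (fun l => l ++ (x :: xs).take 4500)) := by
        intro d'
        cases htk : (x :: xs).take 4500 with
        | nil => simp at htk
        | cons y ys =>
          rw [PySem.List.enumerate_cons, List.foldl_cons]
          have h0 : PySem.Int.floordiv (4500 * g) 4500 = g := by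
            have := floordiv_chunk g 0 (by norm_num)
            simpa using this
          have hstep : bItemStep key d' (4500 * g, y)
              = d'.modify (key ++ "_" ++ PySem.Int.toStr g) PySem.Dict.empty
                  (fun inner => inner.modify (key ++ "_" ++ PySem.Int.toStr g) []
                    (fun l => l ++ [y])) := by
            unfold bItemStep
            simp [h0]
          rw [hstep]
          have hys : ys.length < 4500 := by
            have := htakelt
            rw [htk] at this
            simpa using this
          have := item_fold_acc key (key ++ "_" ++ PySem.Int.toStr g) g ys
            (4500 * g + 1) [y] d'
            (fun i hi => by
              have h45 : i + 1 < 4500 := by omega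
              have h := floordiv_chunk g (i + 1) h45
              push_cast at h
              rw [show 4500 * g + 1 + (i : Int) = 4500 * g + ((i : Int) + 1) from by ring]
              exact h)
            rfl
          rw [this]
          simp
      -- now the drop-part via ih
      by_cases hlong : 4500 ≤ (x :: xs).length
      · have hct : ((x :: xs).take 4500).length = 4500 := by
          rw [List.length_take]; omega
        have hstart : (4500 * g + (((x :: xs).take 4500).length : Int)) = 4500 * (g + 1) := by
          rw [hct]; push_cast; ring
        rw [hstart, hchunk,
          ih ((x :: xs).drop 4500) (by rw [List.length_drop]; omega) (g + 1)]
      · rw [not_le] at hlong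
        have hdrop : (x :: xs).drop 4500 = [] := List.drop_eq_nil_of_le (by omega)
        rw [hdrop]
        rw [bChunkLoop.eq_def]
        simp only [PySem.List.enumerate_nil, List.foldl_nil]
        exact (hchunk _).symm

-- per-key steps agree
lemma keyStep_eq (d : PySem.Dict String (PySem.Dict String (List (List String)))) (key : String) :
    aKeyStep d key = bKeyStep d key := by
  unfold aKeyStep bKeyStep PySem.Dict.pop?
  cases hg : d.get? key with
  | none => simp
  | some dictionary =>
    simp only [Option.map_some]
    have hflat : dictionary.items.foldl (fun st p => p.2.foldl (aItemStep key) st)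
          (d.erase key, (0 : Int), (0 : Int), "", "")
        = (dictionary.values.flatten).foldl (aItemStep key) (d.erase key, 0, 0, "", "") := by
      rw [List.foldl_flatten]
      unfold PySem.Dict.values
      rw [List.foldl_map]
    rw [hflat]
    have h0 := inner_eq key dictionary.values.flatten 0 (d.erase key) 0 0 "" ""
      (Or.inl ⟨rfl, rfl⟩) (by norm_num) (by intro h; exact absurd rfl h)
    have h1 := chunkLoop_eq key dictionary.values.flatten.length dictionary.values.flatten
      le_rfl 0 (d.erase key)
    simp only [mul_zero] at h1
    simpa [h1] using h0

-- ===== VERDICT (by name: the statement is the Claim_ definition above) =====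
theorem sort_new_hierarchy2_spec : Claim_equal_sort_new_hierarchy2 := by
  intro vg lk s h hv _ _
  unfold Spec_sort_new_hierarchy2 sort_new_hierarchy2 sort_new_hierarchy2_alt
  have : aKeyStep = bKeyStep := funext fun d => funext fun k => keyStep_eq d k
  rw [this]
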